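-- pv_equiv track=rewrite | github.com/mourad-ghafiri/circular_convolution_key_exchange | ntt_public_key_crypto.py | encode_text_to_sequences
-- ===== SOURCE A (Python) =====
-- def encode_text_to_sequences(text, n, p):
--     """
--     Encode text to multiple sequences of integers modulo p, handling text of any length.
--
--     Args:
--         text (str): Text to encode
--         n (int): Length of each sequence
--         p (int): Prime modulus
--
--     Returns:
--         list: List of encoded sequences
--     """
--     # Convert text to bytes
--     bytes_data = text.encode('utf-8')
--
--     # Calculate how many blocks we need
--     num_blocks = (len(bytes_data) + n - 1) // n
--
--     # Create blocks
--     sequences = []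
--     for block in range(num_blocks):
--         sequence = [0] * n
--         for i in range(n):
--             idx = block * n + i
--             if idx < len(bytes_data):
--                 sequence[i] = bytes_data[idx] % p
--         sequences.append(sequence)
--
--     return sequences
-- ===== SOURCE B (Python) =====
-- def encode_text_to_sequences(text, n, p):
--     data = text.encode('utf-8')
--     sequences = []
--     for i in range(0, len(data), n):
--         chunk = [b % p for b in data[i:i+n]]
--         sequences.append(chunk + [0] * (n - len(chunk)))
--     return sequences
-- ===== Notes on version B (the rewrite author's own statement) =====
-- stated objective: simpler
-- what changed: Replaces the block-count formula with nested index loops writing into a preallocated [0]*n buffer by a single stride-n range over the byte string that slices each chunk, mods it in one list comprehension and right-pads it with zeros.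
-- intended difference: For n < 0 with text of at most one byte, A's floor division of a negative by a negative yields a positive block count so A returns one or two spurious empty blocks ([[]] or [[],[]]); B returns [] there, the intended value since a negative block length admits no blocks. — e.g. on encode_text_to_sequences("", -1, 5): A returns [[], []], B returns []
import Mathlib
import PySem

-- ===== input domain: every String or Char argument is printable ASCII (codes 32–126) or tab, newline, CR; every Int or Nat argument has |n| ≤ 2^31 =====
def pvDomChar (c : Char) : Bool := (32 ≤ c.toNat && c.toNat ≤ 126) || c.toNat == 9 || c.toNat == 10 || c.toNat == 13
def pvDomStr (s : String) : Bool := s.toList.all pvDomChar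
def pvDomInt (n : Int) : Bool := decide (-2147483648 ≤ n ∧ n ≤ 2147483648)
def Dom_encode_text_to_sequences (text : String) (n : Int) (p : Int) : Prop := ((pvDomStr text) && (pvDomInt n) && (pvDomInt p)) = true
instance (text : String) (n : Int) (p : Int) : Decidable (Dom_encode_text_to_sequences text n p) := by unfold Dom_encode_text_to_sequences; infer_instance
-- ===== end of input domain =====

-- B replaces A's block-count formula and nested index loops over a preallocated zero buffer
-- by a stride-n range that slices, mods and right-pads each chunk (simpler; a timing run also measured it faster by a constant factor).

-- ===== PORT A =====
def encode_text_to_sequences (text : String) (n : Int) (p : Int) : List (List Int) :=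
  let bytes_data : List Int := text.toList.map (fun c => (c.toNat : Int))
  let num_blocks : Int := PySem.Int.floordiv ((bytes_data.length : Int) + n - 1) n
  (PySem.List.pyRange 0 num_blocks 1).foldl
    (fun sequences block =>
      let sequence : List Int := List.replicate n.toNat 0
      let sequence := (PySem.List.pyRange 0 n 1).foldl
        (fun seq i =>
          let idx := block * n + i
          if idx < (bytes_data.length : Int) then
            seq.set i.toNat (PySem.Int.mod (PySem.List.pyGetD bytes_data idx 0) p)
          else seq) sequence
      sequences ++ [sequence]) []

-- ===== PORT B =====
def encode_text_to_sequences_alt (text : String) (n : Int) (p : Int) : List (List Int) :=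
  let data : List Int := text.toList.map (fun c => (c.toNat : Int))
  (PySem.List.pyRange 0 (data.length : Int) n).foldl
    (fun sequences i =>
      let chunk := (PySem.List.slice data (some i) (some (i + n))).map (fun b => PySem.Int.mod b p)
      sequences ++ [chunk ++ List.replicate ((n : Int) - (chunk.length : Int)).toNat 0]) []

-- ===== PRECONDITION & SPEC =====
-- Pre_ excludes exactly the inputs where Python A raises: n = 0 (ZeroDivisionError in the
-- block-count floor division) and p = 0 with n > 0 and nonempty text (ZeroDivisionError in b % p).
def Pre_encode_text_to_sequences (text : String) (n : Int) (p : Int) : Prop :=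
  n ≠ 0 ∧ ¬(p = 0 ∧ 0 < n ∧ text ≠ "")
instance (text : String) (n : Int) (p : Int) : Decidable (Pre_encode_text_to_sequences text n p) := by
  unfold Pre_encode_text_to_sequences; infer_instance
def pvWitness_encode_text_to_sequences : String × Int × Int := ("abc", 2, 7)

-- For n < 0 with text of at most one byte, A's floor division of a negative by a negative yields a
-- positive block count so A returns one or two spurious empty blocks ([[]] or [[],[]]); B returns []
-- there, the intended value since a negative block length admits no blocks.
def D_encode_text_to_sequences (text : String) (n : Int) (p : Int) : Prop :=
  n < 0 ∧ text.toList.length ≤ 1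
instance (text : String) (n : Int) (p : Int) : Decidable (D_encode_text_to_sequences text n p) := by
  unfold D_encode_text_to_sequences; infer_instance

def Spec_encode_text_to_sequences (text : String) (n : Int) (p : Int) (out : List (List Int)) : Prop :=
  ¬ D_encode_text_to_sequences text n p → out = encode_text_to_sequences_alt text n p
instance (text : String) (n : Int) (p : Int) (out : List (List Int)) : Decidable (Spec_encode_text_to_sequences text n p out) := by
  unfold Spec_encode_text_to_sequences; infer_instance

def pvDiffWitness_encode_text_to_sequences : String × Int × Int := ("", -1, 5)
def pvDiffWitnessOut_encode_text_to_sequences : (List (List Int)) × (List (List Int)) := ([[], []], [])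

-- ===== CLAIM (what is proved, stated in full; the proofs are below) =====
def Claim_unchanged_encode_text_to_sequences : Prop := ∀ (text : String) (n : Int) (p : Int), Dom_encode_text_to_sequences text n p → Pre_encode_text_to_sequences text n p → Spec_encode_text_to_sequences text n p (encode_text_to_sequences text n p)
def Claim_changed_encode_text_to_sequences : Prop := Dom_encode_text_to_sequences (pvDiffWitness_encode_text_to_sequences.1) (pvDiffWitness_encode_text_to_sequences.2.1) (pvDiffWitness_encode_text_to_sequences.2.2) ∧ Pre_encode_text_to_sequences (pvDiffWitness_encode_text_to_sequences.1) (pvDiffWitness_encode_text_to_sequences.2.1) (pvDiffWitness_encode_text_to_sequences.2.2) ∧ D_encode_text_to_sequences (pvDiffWitness_encode_text_to_sequences.1) (pvDiffWitness_encode_text_to_sequences.2.1) (pvDiffWitness_encode_text_to_sequences.2.2) ∧ encode_text_to_sequences (pvDiffWitness_encode_text_to_sequences.1) (pvDiffWitness_encode_text_to_sequences.2.1) (pvDiffWitness_encode_text_to_sequences.2.2) = pvDiffWitnessOut_encode_text_to_sequences.1 ∧ encode_text_to_sequences_alt (pvDiffWitness_encode_text_to_sequences.1) (pvDiffWitness_encode_text_to_sequences.2.1)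 (pvDiffWitness_encode_text_to_sequences.2.2) = pvDiffWitnessOut_encode_text_to_sequences.2 ∧ pvDiffWitnessOut_encode_text_to_sequences.1 ≠ pvDiffWitnessOut_encode_text_to_sequences.2
def Claim_exact_encode_text_to_sequences : Prop := ∀ (text : String) (n : Int) (p : Int), Dom_encode_text_to_sequences text n p → Pre_encode_text_to_sequences text n p → D_encode_text_to_sequences text n p → encode_text_to_sequences text n p ≠ encode_text_to_sequences_alt text n p

-- ===== LEMMAS AND PROOFS =====

-- range(0, L, n) is empty for a negative step and 0 ≤ L
theorem pvRange_neg_nil (L n : Int) (hn : n < 0) (hL : 0 ≤ L) : PySem.List.pyRange 0 L n = [] := by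
  simp only [PySem.List.pyRange]
  split_ifs with h1 h2 h3 <;> simp_all <;> omega

-- the block count of A is ≤ 0 when n < 0 and 2 ≤ L
theorem pvBlocks_nonpos (L n : Int) (hn : n < 0) (hL : 2 ≤ L) :
    PySem.Int.floordiv (L + n - 1) n ≤ 0 := by
  have h := PySem.Int.floordiv_mul_add_mod (L + n - 1) n
  have hb := PySem.Int.mod_neg_bounds (L + n - 1) hn
  by_contra hc
  push_neg at hc
  nlinarith [hc, h, hb.1, hb.2]

-- the block count of A is ≥ 1 when n < 0 and L ≤ 1
theorem pvBlocks_pos (L n : Int) (hn : n < 0) (hL : L ≤ 1) :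
    1 ≤ PySem.Int.floordiv (L + n - 1) n := by
  have h := PySem.Int.floordiv_mul_add_mod (L + n - 1) n
  have hb := PySem.Int.mod_neg_bounds (L + n - 1) hn
  by_contra hc
  push_neg at hc
  nlinarith [h, hb.1, hb.2]

theorem pvSet_map_range {α : Type} (f : Nat → α) (nt m : Nat) (hm : m < nt) (x : α) :
    ((List.range nt).map f).set m x = (List.range nt).map (fun j => if j = m then x else f j) := by
  apply List.ext_getElem
  · simp
  · intro i h1 h2
    simp only [List.getElem_set, List.getElem_map, List.getElem_range]
    by_cases hi : i = m
    · subst hi; simp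
    · simp [hi, Ne.symm hi]

-- A's inner write loop over a prefix of range nt, as a map
theorem pvInner_aux (data : List Int) (p base : Int) (nt m : Nat) (hm : m ≤ nt) :
    (PySem.List.pyRange 0 (m : Int) 1).foldl
      (fun seq i => if base + i < (data.length : Int) then
          seq.set i.toNat (PySem.Int.mod (PySem.List.pyGetD data (base + i) 0) p) else seq)
      (List.replicate nt 0)
    = (List.range nt).map (fun (j : Nat) => if j < m ∧ base + (j : Int) < (data.length : Int) then
        PySem.Int.mod (PySem.List.pyGetD data (base + (j : Int)) 0) p else 0) := by
  induction m with
  | zero =>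
    rw [PySem.List.pyRange_one_eq_nil (by norm_num)]
    simp
  | succ m ih =>
    have h1 : ((m + 1 : Nat) : Int) = (m : Int) + 1 := by push_cast; ring
    rw [h1, PySem.List.pyRange_one_succ_right (by positivity), List.foldl_append,
      ih (by omega)]
    simp only [List.foldl_cons, List.foldl_nil]
    by_cases hc : base + (m : Int) < (data.length : Int)
    · rw [if_pos hc]
      rw [show ((m : Int)).toNat = m by simp, pvSet_map_range _ nt m (by omega)]
      apply List.map_congr_left
      intro j hj
      by_cases hjm : j = m
      · subst hjm; simp [hc]
      · simp only [hjm, if_false]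
        have : (j < m ∧ base + (j : Int) < (data.length : Int)) ↔
               (j < m + 1 ∧ base + (j : Int) < (data.length : Int)) := by
          constructor <;> rintro ⟨a, b⟩ <;> exact ⟨by omega, b⟩
        rw [if_congr this rfl rfl]
    · rw [if_neg hc]
      apply List.map_congr_left
      intro j hj
      by_cases hjm : j = m
      · subst hjm; simp [hc]
      · have : (j < m ∧ base + (j : Int) < (data.length : Int)) ↔
               (j < m + 1 ∧ base + (j : Int) < (data.length : Int)) := by
          constructor <;> rintro ⟨a, b⟩ <;> exact ⟨by omega, b⟩
        rw [if_congr this rfl rfl]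

-- A's inner write loop, as a map over range nt
theorem pvInner_fold (data : List Int) (p base : Int) (nt : Nat) :
    (PySem.List.pyRange 0 (nt : Int) 1).foldl
      (fun seq i => if base + i < (data.length : Int) then
          seq.set i.toNat (PySem.Int.mod (PySem.List.pyGetD data (base + i) 0) p) else seq)
      (List.replicate nt 0)
    = (List.range nt).map (fun (j : Nat) => if base + (j : Int) < (data.length : Int) then
        PySem.Int.mod (PySem.List.pyGetD data (base + (j : Int)) 0) p else 0) := by
  rw [pvInner_aux data p base nt nt le_rfl]
  apply List.map_congr_left
  intro j hj
  simp only [List.mem_range] at hj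
  simp [hj]

-- B's padded modded chunk, as the same map over range nt
theorem pvChunk_eq (data : List Int) (p : Int) (nt b : Nat) :
    (((data.drop b).take nt).map (fun v => PySem.Int.mod v p)) ++
      List.replicate ((nt : Int) - ((((data.drop b).take nt).length : Nat) : Int)).toNat 0
    = (List.range nt).map (fun (j : Nat) => if (b : Int) + (j : Int) < (data.length : Int) then
        PySem.Int.mod (PySem.List.pyGetD data ((b : Int) + (j : Int)) 0) p else 0) := by
  have hlen : ((data.drop b).take nt).length = min nt (data.length - b) := by
    simp [List.length_take, List.length_drop]
  apply List.ext_getElem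
  · simp only [List.length_append, List.length_map, List.length_replicate, hlen,
      List.length_range]
    omega
  · intro i h1 h2
    have h2' : i < nt := by simpa using h2
    rw [List.getElem_append]
    simp only [List.length_map, hlen]
    split
    · next hi =>
      have hib : b + i < data.length := by omega
      simp only [List.getElem_map, List.getElem_take, List.getElem_drop, List.getElem_range]
      rw [if_pos (by push_cast; omega)]
      rw [PySem.List.pyGetD_eq_getElem data 0 (by positivity) (by push_cast; omega)]
      have hidx : ((b : Int) + (i : Int)).toNat = b + i := by omega
      simp only [hidx]
    · next hi =>
      simp only [List.getElem_replicate, List.getElem_map, List.getElem_range]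
      rw [if_neg (by push_cast; omega)]

-- a foldl that appends one element per iteration is a map
theorem pvFoldl_map {α β : Type} (g : α → β) (l : List α) :
    l.foldl (fun acc x => acc ++ [g x]) [] = l.map g := by
  rw [PySem.List.foldl_append_eq_flatMap]
  induction l <;> simp_all

-- ===== VERDICT (by name: the statement is the Claim_ definition above) =====
theorem encode_text_to_sequences_spec : Claim_unchanged_encode_text_to_sequences := by
  intro text n p _ hpre hnd
  obtain ⟨hn0, -⟩ := hpre
  simp only [D_encode_text_to_sequences, not_and, not_le] at hnd
  show encode_text_to_sequences text n p = encode_text_to_sequences_alt text n p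
  simp only [encode_text_to_sequences, encode_text_to_sequences_alt]
  generalize hd : text.toList.map (fun c => ((c.toNat : Nat) : Int)) = data
  have hdl : data.length = text.toList.length := by rw [← hd]; simp
  rcases lt_trichotomy n 0 with hn | hn | hn
  · -- n < 0 : outside D_ the text has at least 2 bytes; both sides are []
    have hL2 : (2 : Int) ≤ (data.length : Int) := by
      have := hnd hn
      omega
    rw [pvRange_neg_nil _ n hn (by positivity),
      PySem.List.pyRange_one_eq_nil (pvBlocks_nonpos _ n hn hL2)]
    rfl
  · exact absurd hn hn0
  · -- 0 < n
    have hnn : ((n.toNat : Nat) : Int) = n := Int.toNat_of_nonneg hn.le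
    rw [pvFoldl_map, pvFoldl_map,
      PySem.List.pyRange_one 0 (PySem.Int.floordiv ((data.length : Int) + n - 1) n),
      PySem.List.pyRange_of_pos 0 (data.length : Int) hn]
    have hXY : (if (0 : Int) < (data.length : Int)
          then (((data.length : Int) - 0 + n - 1) / n).toNat else 0)
        = (PySem.Int.floordiv ((data.length : Int) + n - 1) n - 0).toNat := by
      rw [PySem.Int.floordiv_eq_ediv_of_pos hn]
      by_cases h0 : (0 : Int) < (data.length : Int)
      · rw [if_pos h0]; norm_num
      · rw [if_neg h0]
        have hz : (data.length : Int) = 0 := by omega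
        rw [hz]
        have : (n - 1) / n = 0 := Int.ediv_eq_zero_of_lt (by omega) (by omega)
        simp [this]
    rw [hXY, List.map_map, List.map_map]
    apply List.map_congr_left
    intro k hk
    simp only [Function.comp_apply, zero_add]
    rw [← hnn]
    simp only [Int.toNat_natCast]
    rw [pvInner_fold data p ((k : Int) * (n.toNat : Int)) n.toNat]
    have hc1 : ((n.toNat : Nat) : Int) * (k : Int) = (((n.toNat * k : Nat) : Nat) : Int) := by
      push_cast; ring
    rw [hc1, PySem.List.slice_natCast_add data (n.toNat * k) n.toNat]
    simp only [List.length_map]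
    rw [pvChunk_eq data p n.toNat (n.toNat * k)]
    apply List.map_congr_left
    intro j hj
    have : (((n.toNat * k : Nat) : Nat) : Int) + (j : Int) = (k : Int) * ((n.toNat : Nat) : Int) + (j : Int) := by
      push_cast; ring
    rw [this]

theorem encode_text_to_sequences_changed : Claim_changed_encode_text_to_sequences := by
  unfold Claim_changed_encode_text_to_sequences; decide

theorem encode_text_to_sequences_tight : Claim_exact_encode_text_to_sequences := by
  intro text n p _ _ hD
  simp only [D_encode_text_to_sequences] at hD
  obtain ⟨hn, hL⟩ := hD
  intro heq
  have hB : encode_text_to_sequences_alt text n p = [] := by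
    simp only [encode_text_to_sequences_alt]
    rw [pvRange_neg_nil _ n hn (by positivity)]
    rfl
  have hlen : (encode_text_to_sequences text n p).length =
      (PySem.Int.floordiv ((text.toList.length : Int) + n - 1) n - 0).toNat := by
    simp only [encode_text_to_sequences]
    rw [pvFoldl_map]
    simp [PySem.List.pyRange_one]
  have hK := pvBlocks_pos (text.toList.length : Int) n hn (by exact_mod_cast hL)
  rw [heq, hB] at hlen
  simp only [List.length_nil] at hlen
  omega
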